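-- pv_equiv track=rewrite | github.com/ZeroPrimeAI/hive-core | agents/memory_researcher.py | categorize_technique
-- ===== SOURCE A (Python) =====
-- def categorize_technique(tech_name: str) -> str:
--     """Categorize a technique into our taxonomy."""
--     tech_lower = tech_name.lower()
--     if any(kw in tech_lower for kw in ["rag", "retrieval", "search", "query"]):
--         return "retrieval"
--     if any(kw in tech_lower for kw in ["graph", "knowledge", "ontology", "relation"]):
--         return "knowledge_graph"
--     if any(kw in tech_lower for kw in ["vector", "embedding", "semantic", "similarity"]):
--         return "vector_search"
--     if any(kw in tech_lower for kw in ["consolidat", "prune", "decay", "forget", "compress"]):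
--         return "consolidation"
--     if any(kw in tech_lower for kw in ["context", "window", "select", "load"]):
--         return "context_management"
--     if any(kw in tech_lower for kw in ["episod", "event", "timeline", "temporal"]):
--         return "episodic_memory"
--     if any(kw in tech_lower for kw in ["learn", "outcome", "feedback", "reward"]):
--         return "learning"
--     if any(kw in tech_lower for kw in ["mcp", "server", "tool", "plugin", "protocol"]):
--         return "mcp_pattern"
--     if any(kw in tech_lower for kw in ["cache", "tier", "layer", "hierarchy"]):
--         return "memory_hierarchy"
--     return "general"
-- ===== SOURCE B (Python) =====
-- CATEGORIES = [
--     "retrieval", "knowledge_graph", "vector_search", "consolidation",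
--     "context_management", "episodic_memory", "learning", "mcp_pattern",
--     "memory_hierarchy",
-- ]
--
-- KEYWORD_PRIORITY = {
--     "rag": 0, "retrieval": 0, "search": 0, "query": 0,
--     "graph": 1, "knowledge": 1, "ontology": 1, "relation": 1,
--     "vector": 2, "embedding": 2, "semantic": 2, "similarity": 2,
--     "consolidat": 3, "prune": 3, "decay": 3, "forget": 3, "compress": 3,
--     "context": 4, "window": 4, "select": 4, "load": 4,
--     "episod": 5, "event": 5, "timeline": 5, "temporal": 5,
--     "learn": 6, "outcome": 6, "feedback": 6, "reward": 6,
--     "mcp": 7, "server": 7, "tool": 7, "plugin": 7, "protocol": 7,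
--     "cache": 8, "tier": 8, "layer": 8, "hierarchy": 8,
-- }
--
-- def categorize_technique(tech_name: str) -> str:
--     """Single left-to-right scan over the string: at each position, see which
--     keywords start there and keep the best (lowest) category priority found."""
--     s = tech_name.lower()
--     best = 9
--     for i in range(len(s)):
--         for kw, prio in KEYWORD_PRIORITY.items():
--             if prio < best and s.startswith(kw, i):
--                 best = prio
--     return CATEGORIES[best] if best < 9 else "general"
-- ===== Notes on version B (the rewrite author's own statement) =====
-- stated objective: alternative
-- what changed: Replaces the keyword-driven first-match if-chain (built-in substring search per keyword) with a single string-position-driven scan: at each position of the lowered string it looks up which keywords start there in a keyword->priority dict and keeps the minimum category priority, mapping it to the category name at the end.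
import Mathlib
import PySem

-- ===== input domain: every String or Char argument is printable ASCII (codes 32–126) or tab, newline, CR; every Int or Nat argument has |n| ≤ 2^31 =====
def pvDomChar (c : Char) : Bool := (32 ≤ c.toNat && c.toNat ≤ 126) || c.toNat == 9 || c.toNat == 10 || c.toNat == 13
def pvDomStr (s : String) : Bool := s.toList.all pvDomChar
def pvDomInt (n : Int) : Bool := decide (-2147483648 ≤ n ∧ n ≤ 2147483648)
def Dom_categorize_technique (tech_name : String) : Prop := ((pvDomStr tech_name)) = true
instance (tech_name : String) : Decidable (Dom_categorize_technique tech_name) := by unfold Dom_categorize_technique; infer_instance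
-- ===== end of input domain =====

-- B replaces A's keyword-driven first-match if-chain by a single string-position-driven scan
-- (keyword->priority dict, min-priority accumulator, category table lookup at the end); objective: alternative.

-- ===== PORT A =====
def categorize_technique (tech_name : String) : String :=
  let tech_lower := PySem.Str.lower tech_name
  if (["rag", "retrieval", "search", "query"].any (fun kw => PySem.Str.isIn kw tech_lower)) then "retrieval"
  else if (["graph", "knowledge", "ontology", "relation"].any (fun kw => PySem.Str.isIn kw tech_lower)) then "knowledge_graph"
  else if (["vector", "embedding", "semantic", "similarity"].any (fun kw => PySem.Str.isIn kw tech_lower)) then "vector_search"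
  else if (["consolidat", "prune", "decay", "forget", "compress"].any (fun kw => PySem.Str.isIn kw tech_lower)) then "consolidation"
  else if (["context", "window", "select", "load"].any (fun kw => PySem.Str.isIn kw tech_lower)) then "context_management"
  else if (["episod", "event", "timeline", "temporal"].any (fun kw => PySem.Str.isIn kw tech_lower)) then "episodic_memory"
  else if (["learn", "outcome", "feedback", "reward"].any (fun kw => PySem.Str.isIn kw tech_lower)) then "learning"
  else if (["mcp", "server", "tool", "plugin", "protocol"].any (fun kw => PySem.Str.isIn kw tech_lower)) then "mcp_pattern"
  else if (["cache", "tier", "layer", "hierarchy"].any (fun kw => PySem.Str.isIn kw tech_lower)) then "memory_hierarchy"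
  else "general"

-- ===== PORT B =====
def CATEGORIES : List String :=
  [ "retrieval", "knowledge_graph", "vector_search", "consolidation",
    "context_management", "episodic_memory", "learning", "mcp_pattern",
    "memory_hierarchy" ]

-- Python dict KEYWORD_PRIORITY as an association list in insertion order (keys are distinct).
def KEYWORD_PRIORITY : List (String × Nat) :=
  [ ("rag", 0), ("retrieval", 0), ("search", 0), ("query", 0),
    ("graph", 1), ("knowledge", 1), ("ontology", 1), ("relation", 1),
    ("vector", 2), ("embedding", 2), ("semantic", 2), ("similarity", 2),
    ("consolidat", 3), ("prune", 3), ("decay", 3), ("forget", 3), ("compress", 3),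
    ("context", 4), ("window", 4), ("select", 4), ("load", 4),
    ("episod", 5), ("event", 5), ("timeline", 5), ("temporal", 5),
    ("learn", 6), ("outcome", 6), ("feedback", 6), ("reward", 6),
    ("mcp", 7), ("server", 7), ("tool", 7), ("plugin", 7), ("protocol", 7),
    ("cache", 8), ("tier", 8), ("layer", 8), ("hierarchy", 8) ]

-- `s.startswith(kw, i)` with 0 ≤ i is exactly `kw.toList <+: s.toList.drop i`,
-- i.e. PySem.Chars.startswith (s.toList.drop i) kw.toList.
def categorize_technique_alt (tech_name : String) : String :=
  let l := (PySem.Str.lower tech_name).toList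
  let best := (List.range l.length).foldl (fun best i =>
      KEYWORD_PRIORITY.foldl (fun best kp =>
        if kp.2 < best ∧ PySem.Chars.startswith (l.drop i) kp.1.toList = true then kp.2 else best) best) 9
  if best < 9 then CATEGORIES.getD best "general" else "general"

-- ===== PRECONDITION & SPEC =====
def Spec_categorize_technique (tech_name : String) (out : String) : Prop := out = categorize_technique_alt tech_name
instance (tech_name : String) (out : String) : Decidable (Spec_categorize_technique tech_name out) := by unfold Spec_categorize_technique; infer_instance

-- ===== CLAIM (what is proved, stated in full; the proofs are below) =====
def Claim_equal_categorize_technique : Prop := ∀ (tech_name : String), Dom_categorize_technique tech_name → Spec_categorize_technique tech_name (categorize_technique tech_name)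

-- ===== LEMMAS AND PROOFS =====

-- B's loop state, abstracted over the (lowered) character list.
def pvBest (l : List Char) : Nat :=
  (List.range l.length).foldl (fun best i =>
      KEYWORD_PRIORITY.foldl (fun best kp =>
        if kp.2 < best ∧ PySem.Chars.startswith (l.drop i) kp.1.toList = true then kp.2 else best) best) 9

-- keyword lists of A's nine branches, by priority
def Klist : Nat → List String
  | 0 => ["rag", "retrieval", "search", "query"]
  | 1 => ["graph", "knowledge", "ontology", "relation"]
  | 2 => ["vector", "embedding", "semantic", "similarity"]
  | 3 => ["consolidat", "prune", "decay", "forget", "compress"]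
  | 4 => ["context", "window", "select", "load"]
  | 5 => ["episod", "event", "timeline", "temporal"]
  | 6 => ["learn", "outcome", "feedback", "reward"]
  | 7 => ["mcp", "server", "tool", "plugin", "protocol"]
  | 8 => ["cache", "tier", "layer", "hierarchy"]
  | _ => []

def pvCond (l : List Char) (k : Nat) : Bool :=
  (Klist k).any (fun kw => PySem.Chars.isIn kw.toList l)

-- flatten a nested foldl into a foldl over the product list
lemma pv_flatten_foldl {α β γ : Type} (L : List α) (M : List β) (g : α → γ → β → γ) (b0 : γ) :
    L.foldl (fun b i => M.foldl (g i) b) b0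
      = (L.flatMap (fun i => M.map (Prod.mk i))).foldl (fun b x => g x.1 b x.2) b0 := by
  induction L generalizing b0 with
  | nil => rfl
  | cons a L ih => simp only [List.foldl_cons, List.flatMap_cons, List.foldl_append, List.foldl_map, ih]

-- generic characterization of the "min over matching elements" fold
lemma pv_fm_le {α : Type} (p : α → Bool) (h : α → Nat) (L : List α) (b0 : Nat) :
    L.foldl (fun b x => if h x < b ∧ p x = true then h x else b) b0 ≤ b0 := by
  induction L generalizing b0 with
  | nil => simp
  | cons a L ih =>
    simp only [List.foldl_cons]
    refine le_trans (ih _) ?_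
    split_ifs with hc
    · omega
    · omega

lemma pv_fm_eq_or {α : Type} (p : α → Bool) (h : α → Nat) (L : List α) (b0 : Nat) :
    L.foldl (fun b x => if h x < b ∧ p x = true then h x else b) b0 = b0 ∨
      ∃ x ∈ L, p x = true ∧ h x = L.foldl (fun b x => if h x < b ∧ p x = true then h x else b) b0 := by
  induction L generalizing b0 with
  | nil => left; rfl
  | cons a L ih =>
    simp only [List.foldl_cons]
    rcases ih (if h a < b0 ∧ p a = true then h a else b0) with heq | ⟨x, hx, hp, hh⟩
    · rw [heq]
      split_ifs with hc
      · exact Or.inr ⟨a, List.mem_cons_self, hc.2, rfl⟩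
      · exact Or.inl rfl
    · exact Or.inr ⟨x, List.mem_cons_of_mem _ hx, hp, hh⟩

lemma pv_fm_le_of_mem {α : Type} (p : α → Bool) (h : α → Nat) (L : List α) (b0 : Nat)
    {x : α} (hx : x ∈ L) (hp : p x = true) :
    L.foldl (fun b x => if h x < b ∧ p x = true then h x else b) b0 ≤ h x := by
  induction L generalizing b0 with
  | nil => cases hx
  | cons a L ih =>
    simp only [List.foldl_cons]
    rcases List.mem_cons.mp hx with rfl | hx'
    · refine le_trans (pv_fm_le p h L _) ?_
      split_ifs with hc
      · omega
      · simp only [hp, and_true] at hc; omega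
    · exact ih _ hx'

-- the flattened iteration space of B's nested loop
def pvFlat (l : List Char) : List (Nat × String × Nat) :=
  (List.range l.length).flatMap (fun i => KEYWORD_PRIORITY.map (Prod.mk i))

def pvP (l : List Char) (x : Nat × String × Nat) : Bool :=
  PySem.Chars.startswith (l.drop x.1) x.2.1.toList

lemma pvBest_eq_flat (l : List Char) :
    pvBest l = (pvFlat l).foldl
      (fun b x => if x.2.2 < b ∧ pvP l x = true then x.2.2 else b) 9 := by
  unfold pvBest pvFlat pvP
  exact pv_flatten_foldl (List.range l.length) KEYWORD_PRIORITY
    (fun i b kp => if kp.2 < b ∧ PySem.Chars.startswith (l.drop i) kp.1.toList = true then kp.2 else b) 9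

-- bridge: "kw starts at some position of l" = "kw is a substring of l" (for nonempty kw)
lemma pv_bridge (kw l : List Char) (hne : kw ≠ []) :
    (∃ i < l.length, PySem.Chars.startswith (l.drop i) kw = true) ↔ PySem.Chars.isIn kw l = true := by
  constructor
  · rintro ⟨i, _, hsw⟩
    rw [← PySem.Chars.exists_prefix_drop_iff_isIn]
    exact ⟨i, (PySem.Chars.startswith_iff _ _).1 hsw⟩
  · intro h
    obtain ⟨j, hj⟩ := (PySem.Chars.exists_prefix_drop_iff_isIn kw l).mpr h
    have hjn : j < l.length := by
      rcases Nat.lt_or_ge j l.length with h' | h'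
      · exact h'
      · rw [List.drop_eq_nil_of_le h'] at hj
        exact absurd (List.prefix_nil.mp hj) hne
    exact ⟨j, hjn, (PySem.Chars.startswith_iff _ _).2 hj⟩

-- every dict entry sits in its branch's keyword list, has priority < 9 and a nonempty key
lemma pv_map_sound : ∀ kp ∈ KEYWORD_PRIORITY, kp.2 < 9 ∧ kp.1 ∈ Klist kp.2 ∧ kp.1.toList ≠ [] := by
  decide

-- every branch keyword sits in the dict with that branch's priority (k < 9) and is nonempty
lemma pv_klist_sound : ∀ k < 9, ∀ kw ∈ Klist k, (kw, k) ∈ KEYWORD_PRIORITY ∧ kw.toList ≠ [] := by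
  decide

lemma pvBest_le_nine (l : List Char) : pvBest l ≤ 9 := by
  rw [pvBest_eq_flat]; exact pv_fm_le _ _ _ _

lemma pvBest_cond_of_lt (l : List Char) (h : pvBest l < 9) : pvCond l (pvBest l) = true := by
  rcases pv_fm_eq_or (pvP l) (fun x => x.2.2) (pvFlat l) 9 with heq | ⟨x, hx, hp, hh⟩
  · rw [pvBest_eq_flat] at h; omega
  · rw [pvBest_eq_flat]
    rw [← hh]
    obtain ⟨i, hi, hkp⟩ := List.mem_flatMap.mp hx
    obtain ⟨kp, hkpm, rfl⟩ := List.mem_map.mp hkp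
    obtain ⟨_, hkl, hne⟩ := pv_map_sound kp hkpm
    unfold pvCond
    rw [List.any_eq_true]
    refine ⟨kp.1, hkl, ?_⟩
    refine (pv_bridge kp.1.toList l hne).mp ⟨i, ?_, hp⟩
    simpa using List.mem_range.mp hi

lemma pvBest_le_of_cond (l : List Char) (k : Nat) (hc : pvCond l k = true) : pvBest l ≤ k := by
  by_cases hk : k < 9
  · unfold pvCond at hc
    obtain ⟨kw, hkw, hin⟩ := List.any_eq_true.mp hc
    obtain ⟨hmem, hne⟩ := pv_klist_sound k hk kw hkw
    obtain ⟨i, hi, hsw⟩ := (pv_bridge kw.toList l hne).mpr hin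
    rw [pvBest_eq_flat]
    have hx : (i, kw, k) ∈ pvFlat l := by
      unfold pvFlat
      exact List.mem_flatMap.mpr ⟨i, List.mem_range.mpr hi, List.mem_map.mpr ⟨(kw, k), hmem, rfl⟩⟩
    exact pv_fm_le_of_mem (pvP l) (fun x => x.2.2) (pvFlat l) 9 hx hsw
  · exact le_trans (pvBest_le_nine l) (by omega)

-- the alt port, phrased through pvBest
lemma alt_eq (tech_name : String) :
    categorize_technique_alt tech_name =
      (if pvBest (PySem.Str.lower tech_name).toList < 9
       then CATEGORIES.getD (pvBest (PySem.Str.lower tech_name).toList) "general" else "general") := rfl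

-- ===== VERDICT (by name: the statement is the Claim_ definition above) =====
theorem categorize_technique_spec : Claim_equal_categorize_technique := by
  intro tech_name _
  unfold Spec_categorize_technique
  rw [alt_eq]
  set l : List Char := (PySem.Str.lower tech_name).toList with hl
  unfold categorize_technique
  simp only [PySem.Str.isIn_eq, ← hl]
  change (if pvCond l 0 = true then "retrieval"
    else if pvCond l 1 = true then "knowledge_graph"
    else if pvCond l 2 = true then "vector_search"
    else if pvCond l 3 = true then "consolidation"
    else if pvCond l 4 = true then "context_management"
    else if pvCond l 5 = true then "episodic_memory"
    else if pvCond l 6 = true then "learning"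
    else if pvCond l 7 = true then "mcp_pattern"
    else if pvCond l 8 = true then "memory_hierarchy"
    else "general") = _
  have hr9 := pvBest_le_nine l
  have hcr := pvBest_cond_of_lt l
  have hle := pvBest_le_of_cond l
  obtain ⟨r, hr⟩ : ∃ r, pvBest l = r := ⟨_, rfl⟩
  rw [hr] at hr9 hcr hle ⊢
  have hF : ∀ j, j < r → pvCond l j = false := by
    intro j hlt
    cases hc : pvCond l j with
    | false => rfl
    | true => exact absurd (hle j hc) (by omega)
  clear hle hr hl
  have h0 : 0 ≤ r := Nat.zero_le r
  interval_cases r <;> simp_all [CATEGORIES]
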